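-- pv_equiv track=rewrite | github.com/bumblebeem/Code-for-CSCI544-Group-58 | Neural-Networks-Fangxu-Meng/load_model.py | chop_words_into_windows
-- ===== SOURCE A (Python) =====
-- def chop_words_into_windows(window_size, tagged_words):
--     X_train = []
--     y_train = []
--     regular_index_begin = window_size // 2
--     regular_index_end = len(tagged_words) - 1 - window_size // 2
--     for i in range(regular_index_begin, regular_index_end + 1):
--         temp_list = []
--         for j in range(i - window_size // 2, i + window_size // 2 + 1):
--             # temp_list.append(tagged_words[j]) 这里只需要token,不需要对应的tag,所以这行代码是错的。。
--             temp_list.append(tagged_words[j][0])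
--         X_train.append(temp_list)
--         y_train.append(tagged_words[i][1])
--     return X_train, y_train
-- ===== SOURCE B (Python) =====
-- def chop_words_into_windows(window_size, tagged_words):
--     tokens = [w for w, _ in tagged_words]
--     tags = [t for _, t in tagged_words]
--     half = window_size // 2
--     n = len(tagged_words) - 2 * half
--     X_train = [tokens[k:k + 2 * half + 1] for k in range(n)]
--     y_train = tags[half:len(tags) - half]
--     return X_train, y_train
-- ===== Notes on version B (the rewrite author's own statement) =====
-- stated objective: simpler
-- what changed: Replaces the nested per-element index loops by one extract-all pass (tokens/tags lists) followed by list slicing: each window is a slice of the precomputed token list and y_train is a single slice of the tag list.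
import Mathlib
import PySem

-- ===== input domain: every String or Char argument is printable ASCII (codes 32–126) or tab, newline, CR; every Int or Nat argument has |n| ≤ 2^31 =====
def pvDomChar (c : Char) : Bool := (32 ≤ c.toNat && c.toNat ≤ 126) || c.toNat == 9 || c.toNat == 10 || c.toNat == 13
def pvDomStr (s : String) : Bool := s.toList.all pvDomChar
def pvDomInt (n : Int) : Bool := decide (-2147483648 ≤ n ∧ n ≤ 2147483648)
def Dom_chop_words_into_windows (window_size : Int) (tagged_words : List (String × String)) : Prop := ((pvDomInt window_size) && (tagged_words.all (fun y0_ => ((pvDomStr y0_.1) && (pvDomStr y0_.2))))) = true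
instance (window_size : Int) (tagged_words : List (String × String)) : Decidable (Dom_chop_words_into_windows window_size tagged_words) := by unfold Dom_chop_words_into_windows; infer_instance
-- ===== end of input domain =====

-- B replaces A's nested per-element index loops by one extract-all pass (token and tag
-- lists) followed by slicing; objective: simpler.

-- ===== PORT A =====
-- literal transliteration of A; the pyGetD default ("", "") is never used: under
-- Pre_ (0 ≤ window_size) every index the loops touch is in range.
def chop_words_into_windows (window_size : Int) (tagged_words : List (String × String)) : List (List String) × List String :=
  let X_train : List (List String) := []
  let y_train : List String := []
  let regular_index_begin : Int := PySem.Int.floordiv window_size 2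
  let regular_index_end : Int := (tagged_words.length : Int) - 1 - PySem.Int.floordiv window_size 2
  (PySem.List.pyRange regular_index_begin (regular_index_end + 1) 1).foldl
    (fun (acc : List (List String) × List String) i =>
      let temp_list : List String :=
        (PySem.List.pyRange (i - PySem.Int.floordiv window_size 2) (i + PySem.Int.floordiv window_size 2 + 1) 1).foldl
          (fun (t : List String) j => t ++ [(PySem.List.pyGetD tagged_words j ("", "")).1]) []
      (acc.1 ++ [temp_list], acc.2 ++ [(PySem.List.pyGetD tagged_words i ("", "")).2]))
    (X_train, y_train)

-- ===== PORT B =====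
def chop_words_into_windows_alt (window_size : Int) (tagged_words : List (String × String)) : List (List String) × List String :=
  let tokens : List String := tagged_words.map (fun w => w.1)
  let tags : List String := tagged_words.map (fun w => w.2)
  let half : Int := PySem.Int.floordiv window_size 2
  let n : Int := (tagged_words.length : Int) - 2 * half
  let X_train : List (List String) :=
    (PySem.List.pyRange 0 n 1).map (fun k => PySem.List.slice tokens (some k) (some (k + 2 * half + 1)))
  let y_train : List String := PySem.List.slice tags (some half) (some ((tags.length : Int) - half))
  (X_train, y_train)

-- ===== PRECONDITION & SPEC =====
-- Pre_ excludes window_size < 0, on which Python A always raises IndexError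
-- (the outer loop runs up to index len(tagged_words), past the end).
def Pre_chop_words_into_windows (window_size : Int) (tagged_words : List (String × String)) : Prop :=
  0 ≤ window_size
instance (window_size : Int) (tagged_words : List (String × String)) : Decidable (Pre_chop_words_into_windows window_size tagged_words) := by unfold Pre_chop_words_into_windows; infer_instance

def pvWitness_chop_words_into_windows : Int × (List (String × String)) :=
  (3, [("the", "DT"), ("cat", "NN"), ("sat", "VBD"), ("down", "RP")])

def Spec_chop_words_into_windows (window_size : Int) (tagged_words : List (String × String)) (out : List (List String) × List String) : Prop := out = chop_words_into_windows_alt window_size tagged_words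
instance (window_size : Int) (tagged_words : List (String × String)) (out : List (List String) × List String) : Decidable (Spec_chop_words_into_windows window_size tagged_words out) := by unfold Spec_chop_words_into_windows; infer_instance

-- ===== CLAIM (what is proved, stated in full; the proofs are below) =====
def Claim_equal_chop_words_into_windows : Prop := ∀ (window_size : Int) (tagged_words : List (String × String)), Dom_chop_words_into_windows window_size tagged_words → Pre_chop_words_into_windows window_size tagged_words → Spec_chop_words_into_windows window_size tagged_words (chop_words_into_windows window_size tagged_words)

-- ===== LEMMAS AND PROOFS =====

-- A's outer loop appends one window and one tag per iteration.
theorem pv_foldl_pair_append (f : Int → List String) (g : Int → String) :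
    ∀ (l : List Int) (a : List (List String)) (b : List String),
      l.foldl (fun (acc : List (List String) × List String) i => (acc.1 ++ [f i], acc.2 ++ [g i])) (a, b)
        = (a ++ l.map f, b ++ l.map g) := by
  intro l
  induction l with
  | nil => simp
  | cons x xs ih => intro a b; simp [List.foldl, ih]

-- A's inner loop collects f over the range.
theorem pv_foldl_singleton {β : Type} (f : Int → β) :
    ∀ (l : List Int) (init : List β),
      l.foldl (fun t j => t ++ [f j]) init = init ++ l.map f := by
  intro l
  induction l with
  | nil => simp
  | cons x xs ih => intro init; simp [List.foldl, ih]

theorem pv_slice_empty {β : Type} (xs : List β) (a b : Int) (h : b ≤ a) (ha : 0 ≤ a)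
    (hl : (xs.length : Int) ≤ a + b) :
    PySem.List.slice xs (some a) (some b) = [] := by
  simp [PySem.List.slice, PySem.List.clampIdx]
  split_ifs <;> omega

theorem pv_range_getD {β : Type} (xs : List β) (d : β) :
    ∀ (m A : Nat), A + m ≤ xs.length →
      (List.range m).map (fun k => xs.getD (A + k) d) = (xs.drop A).take m := by
  intro m
  induction m with
  | zero => simp
  | succ m ih =>
    intro A h
    rw [List.range_succ, List.map_append, ih A (by omega)]
    have h1 : A + m < xs.length := by omega
    have h2 : m < (xs.drop A).length := by simp; omega
    rw [List.take_add_one]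
    simp [List.getElem?_drop, List.getElem?_eq_getElem h1]

-- a range of in-bounds lookups is a slice
theorem pv_map_getD_eq_slice {β : Type} (xs : List β) (d : β) (a b : Int)
    (ha : 0 ≤ a) (hab : a ≤ b) (hb : b ≤ (xs.length : Int)) :
    (PySem.List.pyRange a b 1).map (fun j => PySem.List.pyGetD xs j d)
      = PySem.List.slice xs (some a) (some b) := by
  obtain ⟨A, rfl⟩ : ∃ A : Nat, (A : Int) = a := ⟨a.toNat, Int.toNat_of_nonneg ha⟩
  obtain ⟨B, rfl⟩ : ∃ B : Nat, (B : Int) = b := ⟨b.toNat, Int.toNat_of_nonneg (le_trans ha hab)⟩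
  rw [PySem.List.pyRange_one, PySem.List.slice_natCast]
  have hBA : ((B : Int) - (A : Int)).toNat = B - A := by omega
  rw [hBA, List.map_map]
  have : ∀ k : Nat, ((fun j => PySem.List.pyGetD xs j d) ∘ fun k : Nat => (A : Int) + (k : Int)) k
      = xs.getD (A + k) d := by
    intro k
    simp only [Function.comp]
    rw [show (A : Int) + (k : Int) = ((A + k : Nat) : Int) by push_cast; ring,
        PySem.List.pyGetD_natCast]
  rw [List.map_congr_left (fun k _ => this k)]
  exact pv_range_getD xs d (B - A) A (by omega)

-- projecting a pair lookup = looking up in the projected list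
theorem pv_getD_proj_fst (tw : List (String × String)) (i : Int)
    (h0 : 0 ≤ i) (h1 : i < (tw.length : Int)) :
    (PySem.List.pyGetD tw i ("", "")).1 = PySem.List.pyGetD (tw.map (fun w => w.1)) i "" := by
  rw [PySem.List.pyGetD_eq_getElem tw ("", "") h0 h1,
      PySem.List.pyGetD_eq_getElem (tw.map (fun w => w.1)) "" h0 (by simpa using h1)]
  simp

theorem pv_getD_proj_snd (tw : List (String × String)) (i : Int)
    (h0 : 0 ≤ i) (h1 : i < (tw.length : Int)) :
    (PySem.List.pyGetD tw i ("", "")).2 = PySem.List.pyGetD (tw.map (fun w => w.2)) i "" := by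
  rw [PySem.List.pyGetD_eq_getElem tw ("", "") h0 h1,
      PySem.List.pyGetD_eq_getElem (tw.map (fun w => w.2)) "" h0 (by simpa using h1)]
  simp

-- ===== VERDICT (by name: the statement is the Claim_ definition above) =====
theorem chop_words_into_windows_spec : Claim_equal_chop_words_into_windows := by
  intro ws tw _ hpre
  unfold Spec_chop_words_into_windows chop_words_into_windows chop_words_into_windows_alt
  simp only []
  set h : Int := PySem.Int.floordiv ws 2 with hh
  have hh0 : 0 ≤ h := by
    rw [hh, PySem.Int.floordiv_eq_ediv_of_pos (by norm_num)]
    exact Int.ediv_nonneg hpre (by norm_num)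
  set N : Int := (tw.length : Int) with hN
  have hN0 : 0 ≤ N := by positivity
  rw [pv_foldl_pair_append]
  simp only [List.nil_append, List.length_map]
  have hend : N - 1 - h + 1 = N - h := by ring
  rw [hend]
  by_cases hc : N - h ≤ h
  · -- too few words: everything is empty
    rw [PySem.List.pyRange_one_eq_nil hc, PySem.List.pyRange_one_eq_nil (by omega),
        pv_slice_empty _ _ _ hc hh0 (by simp; omega)]
    simp
  · rw [not_le] at hc
    rw [Prod.mk.injEq]
    constructor
    · -- X_train
      rw [PySem.List.pyRange_one, PySem.List.pyRange_one]
      have hlen : (N - h - h).toNat = (N - 2 * h - 0).toNat := by omega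
      rw [hlen, List.map_map, List.map_map]
      apply List.map_congr_left
      intro k hk
      simp only [List.mem_range] at hk
      have hk' : (k : Int) < N - 2 * h := by omega
      simp only [Function.comp]
      rw [pv_foldl_singleton]
      simp only [List.nil_append]
      have e1 : h + (k : Int) - h = (k : Int) := by ring
      have e2 : h + (k : Int) + h + 1 = (k : Int) + 2 * h + 1 := by ring
      have e3 : (0 : Int) + (k : Int) = (k : Int) := by ring
      rw [e1, e2, e3]
      have hproj : (PySem.List.pyRange (k : Int) ((k : Int) + 2 * h + 1) 1).map
            (fun j => (PySem.List.pyGetD tw j ("", "")).1)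
          = (PySem.List.pyRange (k : Int) ((k : Int) + 2 * h + 1) 1).map
            (fun j => PySem.List.pyGetD (tw.map (fun w => w.1)) j "") := by
        apply List.map_congr_left
        intro j hj
        rw [PySem.List.mem_pyRange_one] at hj
        exact pv_getD_proj_fst tw j (by omega) (by omega)
      rw [hproj, pv_map_getD_eq_slice (tw.map (fun w => w.1)) "" ((k : Int)) ((k : Int) + 2 * h + 1)
            (by omega) (by omega) (by simp only [List.length_map]; omega)]
    · -- y_train
      rw [show ((tw.length : Int)) = N from hN.symm]
      rw [← pv_map_getD_eq_slice (tw.map (fun w => w.2)) "" h (N - h) hh0 (by omega)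
            (by simp only [List.length_map]; omega)]
      apply List.map_congr_left
      intro i hi
      rw [PySem.List.mem_pyRange_one] at hi
      exact pv_getD_proj_snd tw i (by omega) (by omega)
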